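-- pv_equiv track=rewrite | github.com/riordan34/Python_Course | hw3.py | nextAddSubtractIndex
-- ===== SOURCE A (Python) =====
-- def nextAddSubtractIndex(expr):
--     i = 0
--     index = -1 #set to negative 1 initially
--     while (i < len(expr)):
--         if expr[i] == '+' or expr[i] == '-':
--             index = i #find first occurence and and set that as index
--             break
--         i += 1
--     return index #return index, or negative one if it doesn't exist
-- ===== SOURCE B (Python) =====
-- def nextAddSubtractIndex(expr):
--     p = expr.find('+')
--     m = expr.find('-')
--     candidates = [x for x in (p, m) if x >= 0]
--     return min(candidates) if candidates else -1
-- ===== Notes on version B (the rewrite author's own statement) =====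
-- stated objective: idiomatic
-- what changed: Replaces the manual index-counting while loop with early break by two independent str.find scans ('+' and '-') combined by filtering out -1 and taking the minimum.
import Mathlib
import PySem

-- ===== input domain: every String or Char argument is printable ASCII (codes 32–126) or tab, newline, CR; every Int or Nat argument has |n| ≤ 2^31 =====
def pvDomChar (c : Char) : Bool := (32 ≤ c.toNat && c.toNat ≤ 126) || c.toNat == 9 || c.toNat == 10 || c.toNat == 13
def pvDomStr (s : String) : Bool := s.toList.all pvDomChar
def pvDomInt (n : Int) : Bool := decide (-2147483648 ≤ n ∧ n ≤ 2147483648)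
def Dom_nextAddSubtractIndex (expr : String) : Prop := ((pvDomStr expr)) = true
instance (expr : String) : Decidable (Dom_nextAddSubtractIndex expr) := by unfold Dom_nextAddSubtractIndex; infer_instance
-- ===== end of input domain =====

-- B replaces A's manual index-counting while loop (early break) by two str.find scans
-- for '+' and '-' combined with a filter-and-min; objective: idiomatic.


-- ===== PORT A =====
-- A's while loop: walk the characters keeping the running index i; on '+' or '-'
-- break with index = i, otherwise fall off the end with the initial index -1.
def nextAddSubtractIndexLoop : List Char → Int → Int
  | [], _ => -1
  | c :: rest, i => if c = '+' ∨ c = '-' then i else nextAddSubtractIndexLoop rest (i + 1)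

def nextAddSubtractIndex (expr : String) : Int :=
  nextAddSubtractIndexLoop expr.toList 0

-- ===== PORT B =====
def nextAddSubtractIndex_alt (expr : String) : Int :=
  let p := PySem.Str.find expr "+"
  let m := PySem.Str.find expr "-"
  let candidates := [p, m].filter (fun x => decide (0 ≤ x))
  match PySem.List.min? candidates (fun x => x) with
  | some v => v
  | none => -1

-- ===== PRECONDITION & SPEC =====
def Spec_nextAddSubtractIndex (expr : String) (out : Int) : Prop := out = nextAddSubtractIndex_alt expr
instance (expr : String) (out : Int) : Decidable (Spec_nextAddSubtractIndex expr out) := by unfold Spec_nextAddSubtractIndex; infer_instance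

-- ===== CLAIM (what is proved, stated in full; the proofs are below) =====
def Claim_equal_nextAddSubtractIndex : Prop := ∀ (expr : String), Dom_nextAddSubtractIndex expr → Spec_nextAddSubtractIndex expr (nextAddSubtractIndex expr)

-- ===== LEMMAS AND PROOFS =====

-- First index of a single character, structurally.
def charFind : List Char → Char → Int
  | [], _ => -1
  | x :: t, c => if x = c then 0 else (if charFind t c = -1 then -1 else charFind t c + 1)

theorem neg_one_le_charFind (l : List Char) (c : Char) : -1 ≤ charFind l c := by
  induction l with
  | nil => simp [charFind]
  | cons x t ih => simp only [charFind]; split_ifs <;> omega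

theorem find_go_single (c : Char) (l : List Char) (k : Nat) :
    PySem.Chars.find.go [c] l k =
      if charFind l c = -1 then -1 else charFind l c + k := by
  induction l generalizing k with
  | nil => simp [PySem.Chars.find.go, charFind]
  | cons x t ih =>
    have hle := neg_one_le_charFind t c
    by_cases hx : x = c
    · subst hx
      simp [PySem.Chars.find.go, charFind, List.isPrefixOf]
    · have hpre : [c].isPrefixOf (x :: t) = false := by
        simp only [List.isPrefixOf, Bool.and_eq_false_iff, beq_eq_false_iff_ne, ne_eq]
        left
        exact fun h => hx h.symm
      have hcf : charFind (x :: t) c = if charFind t c = -1 then -1 else charFind t c + 1 := by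
        simp [charFind, hx]
      rw [hcf]
      simp only [PySem.Chars.find.go, hpre]
      rw [ih]
      by_cases h : charFind t c = -1 <;> simp [h] <;> push_cast <;> omega

theorem find_single (l : List Char) (c : Char) :
    PySem.Chars.find l [c] = charFind l c := by
  have h := find_go_single c l 0
  have hle := neg_one_le_charFind l c
  simp only [PySem.Chars.find]
  rw [h]; split_ifs <;> omega

-- The combining step of B, on the two single-character find results.
def combMin (p m : Int) : Int :=
  if p = -1 then m else if m = -1 then p else min p m

theorem loop_eq_comb (l : List Char) (i : Int) :
    nextAddSubtractIndexLoop l i =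
      if combMin (charFind l '+') (charFind l '-') = -1 then -1
      else combMin (charFind l '+') (charFind l '-') + i := by
  induction l generalizing i with
  | nil => simp [nextAddSubtractIndexLoop, charFind, combMin]
  | cons x t ih =>
    have hp := neg_one_le_charFind t '+'
    have hm := neg_one_le_charFind t '-'
    have hpm : ('+' : Char) ≠ '-' := by decide
    by_cases hp1 : charFind t '+' = -1 <;> by_cases hm1 : charFind t '-' = -1 <;>
      by_cases h1 : x = '+' <;> by_cases h2 : x = '-' <;>
        (try subst h1) <;> (try subst h2) <;>
          simp_all [nextAddSubtractIndexLoop, charFind, combMin, min_def] <;>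
            (try rw [ih]) <;> split_ifs <;>
              first | exact absurd trivial ‹¬True› | exact (‹False›).elim | omega

-- ===== VERDICT (by name: the statement is the Claim_ definition above) =====
theorem nextAddSubtractIndex_spec : Claim_equal_nextAddSubtractIndex := by
  intro expr _
  unfold Spec_nextAddSubtractIndex nextAddSubtractIndex_alt
  unfold nextAddSubtractIndex
  rw [loop_eq_comb]
  have hplus : PySem.Str.find expr "+" = charFind expr.toList '+' := by
    rw [PySem.Str.find_eq]; exact find_single _ _
  have hminus : PySem.Str.find expr "-" = charFind expr.toList '-' := by
    rw [PySem.Str.find_eq]; exact find_single _ _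
  simp only [hplus, hminus]
  have hp := neg_one_le_charFind expr.toList '+'
  have hm := neg_one_le_charFind expr.toList '-'
  generalize charFind expr.toList '+' = p at hp ⊢
  generalize charFind expr.toList '-' = m at hm ⊢
  by_cases h1 : (0:Int) ≤ p <;> by_cases h2 : (0:Int) ≤ m <;>
    simp [List.filter, h1, h2, PySem.List.min?, combMin, min_def] <;> split_ifs <;>
      first | rfl | exact (‹False›).elim | omega
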